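-- pv_equiv track=rewrite | github.com/shamz84/playlistCleaner | update_group_config.py | categorize_group
-- ===== SOURCE A (Python) =====
-- def categorize_group(group_name):
--     """Automatically categorize a group and suggest exclude flag based on patterns."""
--     group_lower = group_name.lower()
--
--     # Patterns that should typically be excluded
--     exclude_patterns = [
--         # Adult content
--         ('adult', 'xxx', 'for adults'),
--         # Local networks/affiliates
--         ('network', 'affiliates', 'local'),
--         # TV guides
--         ('guide', 'tv guide'),
--         # Low quality
--         (' sd', 'sd '),
--         # HEVC (codec issues)
--         ('hevc', 'h265'),
--         # Specific sports leagues that are usually PPV/premium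
--         ('league pass', 'center ice', 'extra innings', 'sunday ticket'),
--         # Game replays
--         ('replays', 'replay'),
--         # Some PPV patterns
--         ('ppv game', 'ppv event'),
--     ]
--
--     # Check for exclusion patterns
--     for patterns in exclude_patterns:
--         if any(pattern in group_lower for pattern in patterns):
--             return "true"
--
--     # Patterns that should typically be included
--     include_patterns = [
--         # General content
--         ('entertainment', 'general', 'news', 'kids', 'music'),
--         # Sports (non-PPV)
--         ('sport', 'espn+', 'peacock', 'paramount+'),
--         # Premium services
--         ('hbo max', 'disney+', 'amazon prime', 'netflix', 'hulu'),
--         # High quality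
--         ('4k', 'uhd', 'hd', 'raw'),
--         # International good content
--         ('uk|', 'ca|', 'au|', 'nz|'),
--     ]
--
--     # Check for inclusion patterns
--     for patterns in include_patterns:
--         if any(pattern in group_lower for pattern in patterns):
--             return "false"
--
--     # Default to exclude for unknown patterns (conservative approach)
--     return "false"  # Changed to false to be more inclusive by default
-- ===== SOURCE B (Python) =====
-- # Alternative algorithm: a single left-to-right sweep over the lowered name
-- # (naive multi-pattern matching with a first-character index) instead of A's
-- # two-phase pattern loops using the builtin substring search; the include
-- # phase and the default both yield "false", so only the exclude set matters.
-- _EXCLUDE = (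
--     'adult', 'xxx', 'for adults',
--     'network', 'affiliates', 'local',
--     'guide', 'tv guide',
--     ' sd', 'sd ',
--     'hevc', 'h265',
--     'league pass', 'center ice', 'extra innings', 'sunday ticket',
--     'replays', 'replay',
--     'ppv game', 'ppv event',
-- )
--
-- _INDEX = {}
-- for _p in _EXCLUDE:
--     _INDEX.setdefault(_p[0], []).append(_p)
--
-- def categorize_group(group_name):
--     s = group_name.lower()
--     for i, c in enumerate(s):
--         if any(s.startswith(p, i) for p in _INDEX.get(c, ())):
--             return "true"
--     return "false"
-- ===== Notes on version B (the rewrite author's own statement) =====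
-- stated objective: alternative
-- what changed: A's two phases of pattern loops with the builtin substring test are replaced by a single left-to-right sweep over the lowered name that, at each position, prefix-tests only the exclude patterns bucketed under that position's character (a dict index built once); the include phase and the default produce the same result as each other, so only the exclude set is consulted.
import Mathlib
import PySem

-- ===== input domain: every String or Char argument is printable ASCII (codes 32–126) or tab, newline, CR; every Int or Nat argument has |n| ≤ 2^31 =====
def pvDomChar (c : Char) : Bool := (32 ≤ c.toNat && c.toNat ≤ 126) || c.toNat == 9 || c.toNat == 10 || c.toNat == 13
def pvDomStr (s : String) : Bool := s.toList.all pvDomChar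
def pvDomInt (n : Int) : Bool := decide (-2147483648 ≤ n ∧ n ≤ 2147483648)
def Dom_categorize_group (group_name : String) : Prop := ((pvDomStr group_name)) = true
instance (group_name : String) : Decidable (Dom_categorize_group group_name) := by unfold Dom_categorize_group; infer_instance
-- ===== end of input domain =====

-- B replaces A's two-phase pattern loops (builtin substring test per pattern) by one sweep over the name's suffixes with a first-character index of the exclude patterns; same return value, alternative algorithm.


-- ===== PORT A =====
-- A's 'for patterns in list: if any(p in g for p in patterns): return X' loop
def pyAnyLoop (g : String) (pss : List (List String)) : Bool :=
  match pss with
  | [] => false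
  | ps :: rest =>
    if ps.any (fun p => PySem.Str.isIn p g) then true else pyAnyLoop g rest

def categorize_group (group_name : String) : String :=
  let group_lower := PySem.Str.lower group_name
  let exclude_patterns : List (List String) :=
    [ ["adult", "xxx", "for adults"],
      ["network", "affiliates", "local"],
      ["guide", "tv guide"],
      [" sd", "sd "],
      ["hevc", "h265"],
      ["league pass", "center ice", "extra innings", "sunday ticket"],
      ["replays", "replay"],
      ["ppv game", "ppv event"] ]
  if pyAnyLoop group_lower exclude_patterns then "true"
  else
    let include_patterns : List (List String) :=
      [ ["entertainment", "general", "news", "kids", "music"],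
        ["sport", "espn+", "peacock", "paramount+"],
        ["hbo max", "disney+", "amazon prime", "netflix", "hulu"],
        ["4k", "uhd", "hd", "raw"],
        ["uk|", "ca|", "au|", "nz|"] ]
    if pyAnyLoop group_lower include_patterns then "false"
    else "false"

-- ===== PORT B =====
-- B's flat tuple of exclude patterns (as code-point lists; B works character-wise)
def bPatterns : List (List Char) :=
  [ "adult".toList, "xxx".toList, "for adults".toList,
    "network".toList, "affiliates".toList, "local".toList,
    "guide".toList, "tv guide".toList,
    " sd".toList, "sd ".toList,
    "hevc".toList, "h265".toList,
    "league pass".toList, "center ice".toList, "extra innings".toList, "sunday ticket".toList,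
    "replays".toList, "replay".toList,
    "ppv game".toList, "ppv event".toList ]

-- B's module-level index: for p in _EXCLUDE: _INDEX.setdefault(p[0], []).append(p)
-- (the patterns are nonempty literals, so p[0] is their head)
def bIndex : PySem.Dict Char (List (List Char)) :=
  bPatterns.foldl
    (fun d p =>
      match p with
      | [] => d
      | c :: _ => PySem.Dict.insert d c (PySem.Dict.getD d c [] ++ [p]))
    (PySem.Dict.empty : PySem.Dict Char (List (List Char)))

-- B's "for i, c in enumerate(s): if any(s.startswith(p, i) for p in _INDEX.get(c, ())): return \"true\"" loop:
-- recursion on the suffix s[i:], whose head is c; s.startswith(p, i) is startswith of that suffix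
def bScan (s : List Char) : Bool :=
  match s with
  | [] => false
  | c :: rest =>
    if (PySem.Dict.getD bIndex c []).any (fun p => PySem.Chars.startswith (c :: rest) p) then true
    else bScan rest

def categorize_group_alt (group_name : String) : String :=
  let s := PySem.Chars.lower group_name.toList
  if bScan s then "true" else "false"

-- ===== PRECONDITION & SPEC =====
def Spec_categorize_group (group_name : String) (out : String) : Prop := out = categorize_group_alt group_name
instance (group_name : String) (out : String) : Decidable (Spec_categorize_group group_name out) := by unfold Spec_categorize_group; infer_instance

-- ===== CLAIM (what is proved, stated in full; the proofs are below) =====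
def Claim_equal_categorize_group : Prop := ∀ (group_name : String), Dom_categorize_group group_name → Spec_categorize_group group_name (categorize_group group_name)

-- ===== LEMMAS AND PROOFS =====

-- startswith on a cons: the heads must match, then the tails are prefix-tested
lemma sw_cons (c c' : Char) (rest p : List Char) :
    PySem.Chars.startswith (c :: rest) (c' :: p) = ((c' == c) && PySem.Chars.startswith rest p) := by
  by_cases h : c' = c
  · subst h
    simp only [BEq.rfl, Bool.true_and]
    cases hb : PySem.Chars.startswith rest p
    · rw [Bool.eq_false_iff] at hb ⊢
      intro hw
      exact hb ((PySem.Chars.startswith_iff _ _).mpr (List.cons_prefix_cons.mp ((PySem.Chars.startswith_iff _ _).mp hw)).2)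
    · rw [PySem.Chars.startswith_iff, List.cons_prefix_cons]
      exact ⟨rfl, (PySem.Chars.startswith_iff _ _).mp hb⟩
  · have hc : (c' == c) = false := by simp [h]
    rw [hc, Bool.false_and, Bool.eq_false_iff]
    intro hw
    exact h (List.cons_prefix_cons.mp ((PySem.Chars.startswith_iff _ _).mp hw)).1

-- the concrete first-character index B builds at module level
lemma bIndex_items : bIndex.items =
  [ ('a', ["adult".toList, "affiliates".toList]),
    ('x', ["xxx".toList]),
    ('f', ["for adults".toList]),
    ('n', ["network".toList]),
    ('l', ["local".toList, "league pass".toList]),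
    ('g', ["guide".toList]),
    ('t', ["tv guide".toList]),
    (' ', [" sd".toList]),
    ('s', ["sd ".toList, "sunday ticket".toList]),
    ('h', ["hevc".toList, "h265".toList]),
    ('c', ["center ice".toList]),
    ('e', ["extra innings".toList]),
    ('r', ["replays".toList, "replay".toList]),
    ('p', ["ppv game".toList, "ppv event".toList]) ] := by decide

-- at a nonempty suffix, checking the first-character bucket equals checking all patterns
lemma bucket_any (c : Char) (rest : List Char) :
    (PySem.Dict.getD bIndex c []).any (fun p => PySem.Chars.startswith (c :: rest) p)
      = bPatterns.any (fun p => PySem.Chars.startswith (c :: rest) p) := by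
  by_cases h1 : c = 'a'
  · subst h1
    simp [show PySem.Dict.getD bIndex 'a' [] = ["adult".toList, "affiliates".toList] from by decide, bPatterns, sw_cons]
  by_cases h2 : c = 'x'
  · subst h2
    simp [show PySem.Dict.getD bIndex 'x' [] = ["xxx".toList] from by decide, bPatterns, sw_cons]
  by_cases h3 : c = 'f'
  · subst h3
    simp [show PySem.Dict.getD bIndex 'f' [] = ["for adults".toList] from by decide, bPatterns, sw_cons]
  by_cases h4 : c = 'n'
  · subst h4
    simp [show PySem.Dict.getD bIndex 'n' [] = ["network".toList] from by decide, bPatterns, sw_cons]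
  by_cases h5 : c = 'l'
  · subst h5
    simp [show PySem.Dict.getD bIndex 'l' [] = ["local".toList, "league pass".toList] from by decide, bPatterns, sw_cons]
  by_cases h6 : c = 'g'
  · subst h6
    simp [show PySem.Dict.getD bIndex 'g' [] = ["guide".toList] from by decide, bPatterns, sw_cons]
  by_cases h7 : c = 't'
  · subst h7
    simp [show PySem.Dict.getD bIndex 't' [] = ["tv guide".toList] from by decide, bPatterns, sw_cons]
  by_cases h8 : c = ' '
  · subst h8
    simp [show PySem.Dict.getD bIndex ' ' [] = [" sd".toList] from by decide, bPatterns, sw_cons]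
  by_cases h9 : c = 's'
  · subst h9
    simp [show PySem.Dict.getD bIndex 's' [] = ["sd ".toList, "sunday ticket".toList] from by decide, bPatterns, sw_cons]
  by_cases h10 : c = 'h'
  · subst h10
    simp [show PySem.Dict.getD bIndex 'h' [] = ["hevc".toList, "h265".toList] from by decide, bPatterns, sw_cons]
  by_cases h11 : c = 'c'
  · subst h11
    simp [show PySem.Dict.getD bIndex 'c' [] = ["center ice".toList] from by decide, bPatterns, sw_cons]
  by_cases h12 : c = 'e'
  · subst h12
    simp [show PySem.Dict.getD bIndex 'e' [] = ["extra innings".toList] from by decide, bPatterns, sw_cons]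
  by_cases h13 : c = 'r'
  · subst h13
    simp [show PySem.Dict.getD bIndex 'r' [] = ["replays".toList, "replay".toList] from by decide, bPatterns, sw_cons]
  by_cases h14 : c = 'p'
  · subst h14
    simp [show PySem.Dict.getD bIndex 'p' [] = ["ppv game".toList, "ppv event".toList] from by decide, bPatterns, sw_cons]
  simp [bIndex_items, PySem.Dict.getD, PySem.Dict.get?, bPatterns, sw_cons, Ne.symm h1, Ne.symm h2,
    Ne.symm h3, Ne.symm h4, Ne.symm h5, Ne.symm h6, Ne.symm h7, Ne.symm h8, Ne.symm h9, Ne.symm h10,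
    Ne.symm h11, Ne.symm h12, Ne.symm h13, Ne.symm h14]

-- a pattern occurs in c :: t iff it starts there or occurs in t
lemma isIn_cons (p : List Char) (c : Char) (t : List Char) :
    PySem.Chars.isIn p (c :: t) = (PySem.Chars.startswith (c :: t) p || PySem.Chars.isIn p t) := by
  cases h : PySem.Chars.startswith (c :: t) p
  · simp only [Bool.false_or]
    cases h2 : PySem.Chars.isIn p t
    · rw [Bool.eq_false_iff]
      intro hw
      rcases List.infix_cons_iff.mp ((PySem.Chars.isIn_iff_infix _ _).mp hw) with hp | hi
      · exact absurd ((PySem.Chars.startswith_iff _ _).mpr hp) (by simp [h])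
      · exact absurd ((PySem.Chars.isIn_iff_infix _ _).mpr hi) (by simp [h2])
    · rw [PySem.Chars.isIn_iff_infix]
      exact List.infix_cons_iff.mpr (Or.inr ((PySem.Chars.isIn_iff_infix _ _).mp h2))
  · simp only [Bool.true_or]
    rw [PySem.Chars.isIn_iff_infix]
    exact List.infix_cons_iff.mpr (Or.inl ((PySem.Chars.startswith_iff _ _).mp h))

lemma any_or_distrib (l : List (List Char)) (f g : List Char → Bool) :
    l.any (fun x => f x || g x) = (l.any f || l.any g) := by
  induction l with
  | nil => rfl
  | cons a t ih => simp [ih, Bool.or_assoc, Bool.or_left_comm]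

-- B's sweep finds exactly the patterns that occur as substrings
lemma bScan_eq (s : List Char) :
    bScan s = bPatterns.any (fun p => PySem.Chars.isIn p s) := by
  induction s with
  | nil => decide
  | cons c t ih =>
    rw [bScan, bucket_any]
    have hif : ∀ (b x : Bool), (if b = true then true else x) = (b || x) := by
      intro b x; cases b <;> simp
    rw [hif, ih, ← any_or_distrib]
    simp only [← isIn_cons]

-- A's loop over a pattern-tuple list is an 'any'
lemma pyAnyLoop_eq (g : String) (pss : List (List String)) :
    pyAnyLoop g pss = pss.any (fun ps => ps.any (fun p => PySem.Str.isIn p g)) := by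
  induction pss with
  | nil => rfl
  | cons a t ih =>
    have hif : ∀ (b x : Bool), (if b = true then true else x) = (b || x) := by
      intro b x; cases b <;> simp
    rw [pyAnyLoop, hif, ih, List.any_cons]

-- ===== VERDICT (by name: the statement is the Claim_ definition above) =====
theorem categorize_group_spec : Claim_equal_categorize_group := by
  intro g _
  unfold Spec_categorize_group
  simp only [categorize_group, categorize_group_alt, bScan_eq, pyAnyLoop_eq]
  simp [bPatterns, Bool.or_assoc]
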